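-- pv_equiv track=rewrite | github.com/jolammi/adventofcode2022 | aoc/day8/puzzles.py | get_visible_coords_for_row
-- ===== SOURCE A (Python) =====
-- def is_visible(row: list[int], idx: int) -> bool:
--     """
--     Returns true if given index of a row is visible from outside the grid.
--     If any tree between the current tree and the beginning of the row is as high or
--     taller than the current tree, returns False, else True."""
--     if not any([x >= row[idx] for x in row[:idx]]):
--         return True
--     return False
--
-- def get_visible_coords_for_row(
--     row: list[int], row_idx: int, flipped: bool = False
-- ) -> set[tuple[int, int]]:
--     """
--     Calculates visible trees for one row and for its reversed version.
--     Generates a set of coordinates that mark trees that are visible from outside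
--     the grid.
--     This function could be written shorter but it's late and I want to sleep,
--     so it'll do for now.
--     """
--     coords = set()
--     for idx in range(len((row))):
--         if idx == 0:
--             continue
--         if is_visible(row, idx):
--             if not flipped:
--                 coords.add((row_idx, idx))
--             else:
--                 coords.add((idx, row_idx))
--
--     reversed_row = list(reversed(row))
--     for idx in range(len((reversed_row))):
--         curr_actual_idx = len(row) - 1 - idx
--         if idx == 0:
--             continue
--         if is_visible(reversed_row, idx):
--             if not flipped:
--                 coords.add((row_idx, curr_actual_idx))
--             else:
--                 coords.add((curr_actual_idx, row_idx))
--     return coords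
-- ===== SOURCE B (Python) =====
-- def get_visible_coords_for_row(row, row_idx, flipped=False):
--     # Single pass per direction with a running maximum: O(n) instead of A's
--     # quadratic rescan of every prefix.
--     coords = set()
--     if not row:
--         return coords
--     n = len(row)
--     m = row[0]
--     for idx, h in enumerate(row[1:], 1):
--         if h > m:
--             coords.add((idx, row_idx) if flipped else (row_idx, idx))
--             m = h
--     rev = list(reversed(row))
--     m = rev[0]
--     for idx, h in enumerate(rev[1:], 1):
--         if h > m:
--             i = n - 1 - idx
--             coords.add((i, row_idx) if flipped else (row_idx, i))
--             m = h
--     return coords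
-- ===== Notes on version B (the rewrite author's own statement) =====
-- stated objective: faster
-- what changed: Replaces the per-index is_visible prefix rescan (any over row[:idx] for every idx, in both directions) with one running-maximum sweep per direction that emits an index exactly when its height exceeds the maximum seen so far.
import Mathlib
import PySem

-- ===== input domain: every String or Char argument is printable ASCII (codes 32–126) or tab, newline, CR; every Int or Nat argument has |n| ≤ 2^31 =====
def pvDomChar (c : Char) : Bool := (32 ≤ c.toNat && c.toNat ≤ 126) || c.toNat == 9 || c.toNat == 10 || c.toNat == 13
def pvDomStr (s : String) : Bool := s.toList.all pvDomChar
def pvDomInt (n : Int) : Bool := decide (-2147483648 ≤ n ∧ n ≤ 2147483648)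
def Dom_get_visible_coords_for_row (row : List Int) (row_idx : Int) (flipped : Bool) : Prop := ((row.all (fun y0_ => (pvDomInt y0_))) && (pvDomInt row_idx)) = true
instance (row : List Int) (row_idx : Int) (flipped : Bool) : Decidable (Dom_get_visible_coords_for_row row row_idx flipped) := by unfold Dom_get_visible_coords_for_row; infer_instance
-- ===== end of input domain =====

-- B replaces A's quadratic per-index prefix rescan with one running-maximum sweep per direction (objective: faster, asymptotic).

-- ===== PORT A =====
-- row[idx] is always in range at A's call sites (idx ∈ range(len(row))), so pyGetD with default 0 is exact here.
def is_visible (row : List Int) (idx : Int) : Bool :=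
  if !((PySem.List.slice row none (some idx)).any (fun x => decide (PySem.List.pyGetD row idx 0 ≤ x))) then
    true
  else
    false

def get_visible_coords_for_row (row : List Int) (row_idx : Int) (flipped : Bool) : List (Int × Int) :=
  let coords : PySem.Set (Int × Int) := PySem.Set.empty
  let coords := (PySem.List.pyRange 0 (PySem.List.len row) 1).foldl
    (fun coords idx =>
      if idx == 0 then coords
      else if is_visible row idx then
        if !flipped then PySem.Set.add coords (row_idx, idx)
        else PySem.Set.add coords (idx, row_idx)
      else coords) coords
  let reversed_row := row.reverse
  let coords := (PySem.List.pyRange 0 (PySem.List.len reversed_row) 1).foldl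
    (fun coords idx =>
      let curr_actual_idx := PySem.List.len row - 1 - idx
      if idx == 0 then coords
      else if is_visible reversed_row idx then
        if !flipped then PySem.Set.add coords (row_idx, curr_actual_idx)
        else PySem.Set.add coords (curr_actual_idx, row_idx)
      else coords) coords
  coords

-- ===== PORT B =====
def get_visible_coords_for_row_alt (row : List Int) (row_idx : Int) (flipped : Bool) : List (Int × Int) :=
  let coords : PySem.Set (Int × Int) := PySem.Set.empty
  if row.isEmpty then coords
  else
    let n := PySem.List.len row
    let s1 := (PySem.List.enumerate (PySem.List.slice row (some 1) none) 1).foldl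
      (fun (st : Int × PySem.Set (Int × Int)) p =>
        if p.2 > st.1 then
          (p.2, if flipped then PySem.Set.add st.2 (p.1, row_idx) else PySem.Set.add st.2 (row_idx, p.1))
        else st)
      (PySem.List.pyGetD row 0 0, coords)
    let rev := row.reverse
    let s2 := (PySem.List.enumerate (PySem.List.slice rev (some 1) none) 1).foldl
      (fun (st : Int × PySem.Set (Int × Int)) p =>
        if p.2 > st.1 then
          (p.2, if flipped then PySem.Set.add st.2 (n - 1 - p.1, row_idx) else PySem.Set.add st.2 (row_idx, n - 1 - p.1))
        else st)
      (PySem.List.pyGetD rev 0 0, s1.2)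
    s2.2

-- ===== PRECONDITION & SPEC =====
def Spec_get_visible_coords_for_row (row : List Int) (row_idx : Int) (flipped : Bool) (out : List (Int × Int)) : Prop := out = get_visible_coords_for_row_alt row row_idx flipped
instance (row : List Int) (row_idx : Int) (flipped : Bool) (out : List (Int × Int)) : Decidable (Spec_get_visible_coords_for_row row row_idx flipped out) := by unfold Spec_get_visible_coords_for_row; infer_instance

-- ===== CLAIM (what is proved, stated in full; the proofs are below) =====
def Claim_equal_get_visible_coords_for_row : Prop := ∀ (row : List Int) (row_idx : Int) (flipped : Bool), Dom_get_visible_coords_for_row row row_idx flipped → Spec_get_visible_coords_for_row row row_idx flipped (get_visible_coords_for_row row row_idx flipped)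

-- ===== LEMMAS AND PROOFS =====

-- the visibility test of A at index pre.length of pre ++ h :: u is the running-max test of B
lemma is_visible_eq_max (pre : List Int) (h : Int) (u : List Int) (m : Int)
    (hm : m ∈ pre) (hle : ∀ x ∈ pre, x ≤ m) :
    is_visible (pre ++ h :: u) (pre.length : Int) = decide (m < h) := by
  have hget : PySem.List.pyGetD (pre ++ h :: u) (pre.length : Int) 0 = h := by
    rw [PySem.List.pyGetD_natCast]
    simp [List.getD_eq_getElem?_getD]
  have hslice : PySem.List.slice (pre ++ h :: u) none (some (pre.length : Int)) = pre := by
    rw [PySem.List.slice_to_natCast]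
    simp
  unfold is_visible
  rw [hslice, hget]
  by_cases hc : m < h
  · have : pre.any (fun x => decide (h ≤ x)) = false := by
      simp only [List.any_eq_false, decide_eq_true_eq]
      intro x hx
      have := hle x hx
      omega
    simp [this, hc]
  · have : pre.any (fun x => decide (h ≤ x)) = true := by
      simp only [List.any_eq_true, decide_eq_true_eq]
      exact ⟨m, hm, by omega⟩
    simp [this, hc]

-- core scan lemma: A's indexed visibility fold over the suffix u equals B's
-- running-maximum fold, for any emit function
lemma visScan (emitg : List (Int × Int) → Int → List (Int × Int)) :
    ∀ (u pre : List Int) (m : Int) (s : List (Int × Int)),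
      m ∈ pre → (∀ x ∈ pre, x ≤ m) →
      (PySem.List.pyRange (pre.length : Int) (((pre ++ u).length : Nat) : Int) 1).foldl
        (fun cs idx => if is_visible (pre ++ u) idx then emitg cs idx else cs) s
      = ((PySem.List.enumerate u (pre.length : Int)).foldl
          (fun st p => if p.2 > st.1 then (p.2, emitg st.2 p.1) else st) (m, s)).2 := by
  intro u
  induction u with
  | nil =>
    intro pre m s hm hle
    simp [PySem.List.enumerate]
  | cons h u' ih =>
    intro pre m s hm hle
    have hlt : (pre.length : Int) < (((pre ++ h :: u').length : Nat) : Int) := by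
      have : (pre ++ h :: u').length = pre.length + (u'.length + 1) := by simp
      omega
    rw [PySem.List.pyRange_one_cons hlt, PySem.List.enumerate_cons]
    simp only [List.foldl_cons, is_visible_eq_max pre h u' m hm hle]
    have hrw : pre ++ h :: u' = (pre ++ [h]) ++ u' := by simp
    have hlen : (pre.length : Int) + 1 = (((pre ++ [h]).length : Nat) : Int) := by
      simp
    by_cases hc : m < h
    · simp only [hc, decide_true, if_true, gt_iff_lt]
      rw [hrw, hlen]
      exact ih (pre ++ [h]) h (emitg s (pre.length : Int))
        (by simp)
        (by intro x hx; rcases List.mem_append.mp hx with hx | hx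
            · have := hle x hx; omega
            · simp at hx; omega)
    · simp only [hc, decide_false, if_false, gt_iff_lt]
      rw [hrw, hlen]
      exact ih (pre ++ [h]) m s
        (by simp [hm])
        (by intro x hx; rcases List.mem_append.mp hx with hx | hx
            · exact hle x hx
            · simp at hx; omega)

-- ===== VERDICT (by name: the statement is the Claim_ definition above) =====
-- one guarded A-loop over a nonempty list equals one B-sweep, for any emit function
lemma loopEq (emitg : List (Int × Int) → Int → List (Int × Int)) (h0 : Int) (t : List Int)
    (s : List (Int × Int)) :
    (PySem.List.pyRange 0 (((h0 :: t).length : Nat) : Int) 1).foldl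
      (fun cs idx => if idx == 0 then cs else if is_visible (h0 :: t) idx then emitg cs idx else cs) s
    = ((PySem.List.enumerate t 1).foldl
        (fun st p => if p.2 > st.1 then (p.2, emitg st.2 p.1) else st) (h0, s)).2 := by
  have h01 : (0 : Int) < (((h0 :: t).length : Nat) : Int) := by
    simp
  rw [PySem.List.pyRange_one_cons h01]
  simp only [List.foldl_cons, beq_self_eq_true, if_true]
  rw [PySem.List.foldl_congr_mem _ _
      (fun cs idx => if is_visible (h0 :: t) idx then emitg cs idx else cs) s
      (by intro acc x hx
          have hx1 := (PySem.List.mem_pyRange_one.mp hx).1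
          have hne : (x == 0) = false := by simp; omega
          simp [hne])]
  have := visScan emitg t [h0] h0 s (by simp) (by simp)
  simpa using this

theorem get_visible_coords_for_row_spec : Claim_equal_get_visible_coords_for_row := by
  intro row row_idx flipped _
  unfold Spec_get_visible_coords_for_row
  cases row with
  | nil => rfl
  | cons h0 t =>
    obtain ⟨r0, rt, hrev⟩ : ∃ a l, (h0 :: t).reverse = a :: l := by
      cases hr : (h0 :: t).reverse with
      | nil => exact absurd (List.reverse_eq_nil_iff.mp hr) (by simp)
      | cons a l => exact ⟨a, l, rfl⟩
    unfold get_visible_coords_for_row get_visible_coords_for_row_alt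
    simp only [List.isEmpty_cons, if_false, Bool.false_eq_true, PySem.List.len_eq,
      PySem.List.slice_from_one, List.tail_cons, hrev]
    rw [show PySem.List.pyGetD (h0 :: t) 0 0 = h0 by simp [PySem.List.pyGetD_ofNat'],
      show PySem.List.pyGetD (r0 :: rt) 0 0 = r0 by simp [PySem.List.pyGetD_ofNat']]
    cases flipped with
    | false =>
      simp only [Bool.not_false, Bool.false_eq_true, if_true, if_false]
      rw [loopEq (fun cs idx => PySem.Set.add cs (row_idx, idx)) h0 t PySem.Set.empty,
        loopEq (fun cs idx => PySem.Set.add cs (row_idx, (((h0 :: t).length : Nat) : Int) - 1 - idx)) r0 rt]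
    | true =>
      simp only [Bool.not_true, Bool.false_eq_true, if_true, if_false]
      rw [loopEq (fun cs idx => PySem.Set.add cs (idx, row_idx)) h0 t PySem.Set.empty,
        loopEq (fun cs idx => PySem.Set.add cs ((((h0 :: t).length : Nat) : Int) - 1 - idx, row_idx)) r0 rt]
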